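-- pv_equiv track=rewrite | github.com/AditiSatsangi/EEG-Pain-Estimation | notebooks/train_ml.py | _find_roi_indices
-- ===== SOURCE A (Python) =====
-- ROI_GROUPS = {
--     'frontal':    ['fp1','fp2','f1','f2','f3','f4','f5','f6','f7','f8','fz'],
--     'frontocent': ['fc1','fc2','fc3','fc4','fc5','fc6','fcz'],
--     'central':    ['c1','c2','c3','c4','c5','c6','cz'],
--     'parietal':   ['p1','p2','p3','p4','p5','p6','pz'],
--     'occipital':  ['o1','o2','oz'],
--     'temp_left':  ['t7','t3','ft7','tp7'],
--     'temp_right': ['t8','t4','ft8','tp8'],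
-- }
--
-- ROI_KEYS = list(ROI_GROUPS.keys())
--
-- def _find_roi_indices(ch_names):
--     idxs = []
--     ch_l = [str(c).lower() for c in ch_names]
--     for key in ROI_KEYS:
--         want = ROI_GROUPS[key]
--         grp = [i for i, name in enumerate(ch_l) if any(w in name for w in want)]
--         idxs.append(grp)
--     return idxs
-- ===== SOURCE B (Python) =====
-- ROI_GROUPS = {
--     'frontal':    ['fp1','fp2','f1','f2','f3','f4','f5','f6','f7','f8','fz'],
--     'frontocent': ['fc1','fc2','fc3','fc4','fc5','fc6','fcz'],
--     'central':    ['c1','c2','c3','c4','c5','c6','cz'],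
--     'parietal':   ['p1','p2','p3','p4','p5','p6','pz'],
--     'occipital':  ['o1','o2','oz'],
--     'temp_left':  ['t7','t3','ft7','tp7'],
--     'temp_right': ['t8','t4','ft8','tp8'],
-- }
--
-- ROI_KEYS = list(ROI_GROUPS.keys())
--
-- # Inverted hash index: ROI word -> list of group positions (built once at module load).
-- WORD_TO_GROUPS = {}
-- for _gi, _words in enumerate(ROI_GROUPS.values()):
--     for _w in _words:
--         WORD_TO_GROUPS.setdefault(_w, []).append(_gi)
-- MAX_WORD_LEN = 3  # every ROI word has 1..3 characters
--
--
-- def _find_roi_indices(ch_names):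
--     # Instead of substring-testing every ROI word against every channel, enumerate
--     # each channel's substrings of length 1..MAX_WORD_LEN and look them up in the
--     # inverted index; a hit distributes the channel's index into the matched buckets.
--     buckets = [[] for _ in ROI_GROUPS]
--     for i, c in enumerate(ch_names):
--         name = str(c).lower()
--         hit = set()
--         for start in range(len(name)):
--             for L in (1, 2, 3):
--                 hit.update(WORD_TO_GROUPS.get(name[start:start + L], ()))
--         for gi in sorted(hit):
--             buckets[gi].append(i)
--     return buckets
-- ===== Notes on version B (the rewrite author's own statement) =====
-- stated objective: alternative
-- what changed: Replaces A's per-group substring tests (every ROI word tested against every channel name) by an inverted hash index from ROI word to group positions: each channel's substrings of length 1-3 are looked up in the index and the hits are distributed into per-group buckets, so no substring-containment test remains.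
import Mathlib
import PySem

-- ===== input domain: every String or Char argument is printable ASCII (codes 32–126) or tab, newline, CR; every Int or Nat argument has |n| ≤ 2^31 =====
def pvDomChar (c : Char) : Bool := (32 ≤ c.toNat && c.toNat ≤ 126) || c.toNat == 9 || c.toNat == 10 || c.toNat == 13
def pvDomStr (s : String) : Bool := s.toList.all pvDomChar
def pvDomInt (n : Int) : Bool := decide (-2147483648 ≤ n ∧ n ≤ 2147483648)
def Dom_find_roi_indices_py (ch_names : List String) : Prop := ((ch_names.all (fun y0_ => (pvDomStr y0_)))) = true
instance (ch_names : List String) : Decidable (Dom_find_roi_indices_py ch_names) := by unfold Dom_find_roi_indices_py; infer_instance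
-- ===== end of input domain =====

-- B replaces A's per-group substring tests by an inverted word→group hash index queried with each
-- channel's substrings of length 1..3 (alternative algorithm, no containment test left).

-- shared module constants (ROI_GROUPS dict, ROI_KEYS = list(ROI_GROUPS.keys()))
def pvROI_GROUPS : PySem.Dict String (List String) := PySem.Dict.ofList
  [("frontal",    ["fp1","fp2","f1","f2","f3","f4","f5","f6","f7","f8","fz"]),
   ("frontocent", ["fc1","fc2","fc3","fc4","fc5","fc6","fcz"]),
   ("central",    ["c1","c2","c3","c4","c5","c6","cz"]),
   ("parietal",   ["p1","p2","p3","p4","p5","p6","pz"]),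
   ("occipital",  ["o1","o2","oz"]),
   ("temp_left",  ["t7","t3","ft7","tp7"]),
   ("temp_right", ["t8","t4","ft8","tp8"])]

def pvROI_KEYS : List String := pvROI_GROUPS.keys

-- ===== PORT A =====
-- ROI_GROUPS[key] always succeeds because every key of pvROI_KEYS is a key of the dict; getD [] is exact here.
def find_roi_indices_py (ch_names : List String) : List (List Int) :=
  let ch_l := ch_names.map PySem.Str.lower
  pvROI_KEYS.foldl (fun idxs key =>
    let want := (pvROI_GROUPS.get? key).getD []
    idxs ++ [(PySem.List.enumerate ch_l).filterMap
      (fun p => if want.any (fun w => PySem.Str.isIn w p.2) then some p.1 else none)]) []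

-- ===== PORT B =====
-- module-level inverted index WORD_TO_GROUPS: word -> group positions; setdefault(w, []).append(gi)
-- observably equals overwriting the key in place with its list extended by gi.
def pvWORD_TO_GROUPS : PySem.Dict String (List Int) :=
  (PySem.List.enumerate pvROI_GROUPS.values).foldl
    (fun d p => p.2.foldl (fun d w => d.insert w ((d.get? w).getD [] ++ [p.1])) d)
    PySem.Dict.empty

-- buckets[gi].append(i): every gi drawn from the index is a group position 0..6, hence a valid
-- nonnegative in-range list index, so List.modify at gi.toNat is exact.
def find_roi_indices_py_alt (ch_names : List String) : List (List Int) :=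
  let buckets : List (List Int) := pvROI_GROUPS.keys.map (fun _ => ([] : List Int))
  (PySem.List.enumerate ch_names).foldl (fun buckets p =>
    let name := PySem.Str.lower p.2
    let hit : PySem.Set Int :=
      (PySem.List.pyRange 0 (PySem.Str.len name) 1).foldl (fun hit start =>
        (([1, 2, 3] : List Int)).foldl (fun hit L =>
          PySem.Set.update hit
            ((pvWORD_TO_GROUPS.get? (PySem.Str.slice name (some start) (some (start + L)))).getD []))
          hit)
        PySem.Set.empty
    (PySem.List.sorted hit (fun x => x) false).foldl
      (fun bs gi => bs.modify gi.toNat (· ++ [p.1])) buckets)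
    buckets

-- ===== PRECONDITION & SPEC =====
def Spec_find_roi_indices_py (ch_names : List String) (out : List (List Int)) : Prop := out = find_roi_indices_py_alt ch_names
instance (ch_names : List String) (out : List (List Int)) : Decidable (Spec_find_roi_indices_py ch_names out) := by unfold Spec_find_roi_indices_py; infer_instance

-- ===== CLAIM =====
def Claim_equal_find_roi_indices_py : Prop := ∀ (ch_names : List String), Dom_find_roi_indices_py ch_names → Spec_find_roi_indices_py ch_names (find_roi_indices_py ch_names)

-- ===== LEMMAS AND PROOFS =====

-- the inverted index, flattened: the 43 (word, group position) pairs
def pvFLAT : List (String × Int) :=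
  [("fp1",0),("fp2",0),("f1",0),("f2",0),("f3",0),("f4",0),("f5",0),("f6",0),("f7",0),("f8",0),("fz",0),
   ("fc1",1),("fc2",1),("fc3",1),("fc4",1),("fc5",1),("fc6",1),("fcz",1),
   ("c1",2),("c2",2),("c3",2),("c4",2),("c5",2),("c6",2),("cz",2),
   ("p1",3),("p2",3),("p3",3),("p4",3),("p5",3),("p6",3),("pz",3),
   ("o1",4),("o2",4),("oz",4),
   ("t7",5),("t3",5),("ft7",5),("tp7",5),
   ("t8",6),("t4",6),("ft8",6),("tp8",6)]

-- the inverted index as a literal dict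
def pvLIT : PySem.Dict String (List Int) := PySem.Dict.mk
  [("fp1",[0]),("fp2",[0]),("f1",[0]),("f2",[0]),("f3",[0]),("f4",[0]),("f5",[0]),("f6",[0]),("f7",[0]),("f8",[0]),("fz",[0]),
   ("fc1",[1]),("fc2",[1]),("fc3",[1]),("fc4",[1]),("fc5",[1]),("fc6",[1]),("fcz",[1]),
   ("c1",[2]),("c2",[2]),("c3",[2]),("c4",[2]),("c5",[2]),("c6",[2]),("cz",[2]),
   ("p1",[3]),("p2",[3]),("p3",[3]),("p4",[3]),("p5",[3]),("p6",[3]),("pz",[3]),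
   ("o1",[4]),("o2",[4]),("oz",[4]),
   ("t7",[5]),("t3",[5]),("ft7",[5]),("tp7",[5]),
   ("t8",[6]),("t4",[6]),("ft8",[6]),("tp8",[6])]

set_option maxRecDepth 4096 in
lemma pvW_eq : pvWORD_TO_GROUPS = pvLIT := by decide

lemma pv_lookup_iff (s : String) (gi : Int) :
    gi ∈ (pvWORD_TO_GROUPS.get? s).getD [] ↔ (s, gi) ∈ pvFLAT := by
  rw [pvW_eq]
  constructor
  · intro h
    obtain ⟨v, hv, hgi⟩ : ∃ v, pvLIT.get? s = some v ∧ gi ∈ v := by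
      cases hq : pvLIT.get? s with
      | none => rw [hq] at h; simp at h
      | some v => exact ⟨v, rfl, by rw [hq] at h; simpa using h⟩
    have := PySem.Dict.mem_items_of_get?_eq_some (d := pvLIT) hv
    simp only [pvLIT] at this
    simp only [pvFLAT]
    simp only [List.mem_cons, Prod.mk.injEq, List.not_mem_nil, or_false] at this ⊢
    rcases this with h1|h1|h1|h1|h1|h1|h1|h1|h1|h1|h1|h1|h1|h1|h1|h1|h1|h1|h1|h1|h1|h1|h1|h1|h1|h1|h1|h1|h1|h1|h1|h1|h1|h1|h1|h1|h1|h1|h1|h1|h1|h1|h1 <;>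
      (obtain ⟨hs, hvv⟩ := h1; subst hs; subst hvv; simp at hgi; simp [hgi])
  · intro h
    simp only [pvFLAT, List.mem_cons, Prod.mk.injEq, List.not_mem_nil, or_false] at h
    rcases h with h|h|h|h|h|h|h|h|h|h|h|h|h|h|h|h|h|h|h|h|h|h|h|h|h|h|h|h|h|h|h|h|h|h|h|h|h|h|h|h|h|h|h <;>
      (obtain ⟨hs, hg⟩ := h; subst hs; subst hg; decide)

-- per-channel hit set of B (abbreviation of the literal fold in find_roi_indices_py_alt)
def pvHit (name : String) : PySem.Set Int :=
  (PySem.List.pyRange 0 (PySem.Str.len name) 1).foldl (fun hit start =>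
    (([1, 2, 3] : List Int)).foldl (fun hit L =>
      PySem.Set.update hit
        ((pvWORD_TO_GROUPS.get? (PySem.Str.slice name (some start) (some (start + L)))).getD []))
      hit)
    PySem.Set.empty

lemma pv_mem_foldl_step {β : Type} (xs : List β) (step : List Int → β → List Int)
    (P : β → Int → Prop) (hstep : ∀ s y a, a ∈ step s y ↔ a ∈ s ∨ P y a)
    (s : List Int) (a : Int) :
    a ∈ xs.foldl step s ↔ a ∈ s ∨ ∃ y ∈ xs, P y a := by
  induction xs generalizing s with
  | nil => simp
  | cons x xs ih =>
    rw [List.foldl_cons, ih, hstep]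
    constructor
    · rintro ((h | h) | ⟨y, hy, hP⟩)
      · exact Or.inl h
      · exact Or.inr ⟨x, by simp, h⟩
      · exact Or.inr ⟨y, by simp [hy], hP⟩
    · rintro (h | ⟨y, hy, hP⟩)
      · exact Or.inl (Or.inl h)
      · rcases List.mem_cons.mp hy with rfl | hy
        · exact Or.inl (Or.inr hP)
        · exact Or.inr ⟨y, hy, hP⟩

lemma pv_nodup_foldl {β : Type} (xs : List β) (step : List Int → β → List Int)
    (h : ∀ s y, s.Nodup → (step s y).Nodup) (s : List Int) (hs : s.Nodup) :
    (xs.foldl step s).Nodup := by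
  induction xs generalizing s with
  | nil => exact hs
  | cons x xs ih => exact ih _ (h _ _ hs)

lemma pv_nodup_hit (name : String) : (pvHit name).Nodup := by
  unfold pvHit
  apply pv_nodup_foldl
  · intro s y hnd
    apply pv_nodup_foldl
    · intro s' y' hnd'
      exact PySem.Set.nodup_update _ _ hnd'
    · exact hnd
  · simp [PySem.Set.empty]

lemma pv_mem_hit (name : String) (gi : Int) :
    gi ∈ pvHit name ↔ ∃ start : Int, 0 ≤ start ∧ start < (name.toList.length : Int) ∧
      ∃ L ∈ ([1,2,3] : List Int),
        gi ∈ (pvWORD_TO_GROUPS.get? (PySem.Str.slice name (some start) (some (start + L)))).getD [] := by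
  unfold pvHit
  rw [pv_mem_foldl_step _ _
    (fun start a => ∃ L ∈ ([1,2,3] : List Int),
        a ∈ (pvWORD_TO_GROUPS.get? (PySem.Str.slice name (some start) (some (start + L)))).getD [])
    (fun s start a => by
      rw [pv_mem_foldl_step _ _
        (fun L a => a ∈ (pvWORD_TO_GROUPS.get? (PySem.Str.slice name (some start) (some (start + L)))).getD [])
        (fun s' L a => PySem.Set.mem_update _ _ _) s a])]
  simp only [PySem.Set.empty, List.not_mem_nil, false_or, PySem.List.mem_pyRange_one,
    PySem.Str.len_eq, and_assoc]

lemma pv_sub_iff (name w : String) (h1 : 1 ≤ w.toList.length) (h3 : w.toList.length ≤ 3) :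
    (∃ start : Int, 0 ≤ start ∧ start < (name.toList.length : Int) ∧
      ∃ L ∈ ([1,2,3] : List Int), PySem.Str.slice name (some start) (some (start + L)) = w)
    ↔ w.toList <:+: name.toList := by
  constructor
  · rintro ⟨start, h0, hlt, L, hLmem, heq⟩
    have hL : (1:Int) ≤ L := by
      rcases (by simpa using hLmem : L = 1 ∨ L = 2 ∨ L = 3) with rfl | rfl | rfl <;> norm_num
    have htl : w.toList
        = List.take ((start + L).toNat - start.toNat) (List.drop start.toNat name.toList) := by
      rw [← heq, PySem.Str.toList_slice, PySem.Chars.slice_eq_listSlice,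
        PySem.List.slice_toNat name.toList h0 (by omega)]
    have hpre : w.toList <+: name.toList.drop start.toNat := by
      rw [htl]; exact List.take_prefix _ _
    exact hpre.isInfix.trans (List.drop_suffix _ _).isInfix
  · rintro ⟨p, sfx, hl⟩
    refine ⟨(p.length : Int), by positivity, ?_, (w.toList.length : Int), ?_, ?_⟩
    · have : name.toList.length = p.length + w.toList.length + sfx.length := by
        rw [← hl]; simp; omega
      omega
    · have : w.toList.length = 1 ∨ w.toList.length = 2 ∨ w.toList.length = 3 := by omega
      rcases this with h | h | h <;> simp [h]
    · apply String.toList_inj.mp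
      rw [PySem.Str.toList_slice, PySem.Chars.slice_eq_listSlice]
      rw [(by push_cast; ring : (p.length : Int) + (w.toList.length : Int)
            = ((p.length + w.toList.length : Nat) : Int))]
      rw [PySem.List.slice_natCast]
      rw [← hl]
      rw [(by omega : p.length + w.toList.length - p.length = w.toList.length)]
      rw [List.append_assoc, List.drop_left, List.take_left]

lemma pv_flat_len : ∀ q ∈ pvFLAT, 1 ≤ q.1.toList.length ∧ q.1.toList.length ≤ 3 := by decide

-- key characterisation: gi lands in B's hit set iff some ROI word mapped to gi is a substring
lemma pv_hit_iff (name : String) (gi : Int) :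
    gi ∈ pvHit name ↔ ∃ w : String, (w, gi) ∈ pvFLAT ∧ w.toList <:+: name.toList := by
  rw [pv_mem_hit]
  constructor
  · rintro ⟨start, h0, hlt, L, hLmem, hmem⟩
    set w := PySem.Str.slice name (some start) (some (start + L)) with hw
    have hflat : (w, gi) ∈ pvFLAT := (pv_lookup_iff _ _).mp hmem
    obtain ⟨hw1, hw3⟩ := pv_flat_len _ hflat
    exact ⟨w, hflat, (pv_sub_iff name w hw1 hw3).mp ⟨start, h0, hlt, L, hLmem, rfl⟩⟩
  · rintro ⟨w, hflat, hinf⟩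
    obtain ⟨hw1, hw3⟩ := pv_flat_len _ hflat
    obtain ⟨start, h0, hlt, L, hLmem, heq⟩ := (pv_sub_iff name w hw1 hw3).mpr hinf
    exact ⟨start, h0, hlt, L, hLmem, by rw [heq]; exact (pv_lookup_iff _ _).mpr hflat⟩

lemma pv_modify_foldl_length (S : List Int) (v : Int) (bs : List (List Int)) :
    (S.foldl (fun bs gi => bs.modify gi.toNat (· ++ [v])) bs).length = bs.length := by
  induction S generalizing bs with
  | nil => rfl
  | cons g S ih => rw [List.foldl_cons, ih]; simp

lemma pv_modify_foldl_getElem (S : List Int) (v : Int) (bs : List (List Int))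
    (hnd : S.Nodup) (hpos : ∀ g ∈ S, 0 ≤ g) (j : Nat) (hj : j < bs.length)
    (hj' : j < (S.foldl (fun bs gi => bs.modify gi.toNat (· ++ [v])) bs).length) :
    (S.foldl (fun bs gi => bs.modify gi.toNat (· ++ [v])) bs)[j]'hj'
      = if (j : Int) ∈ S then bs[j] ++ [v] else bs[j] := by
  induction S generalizing bs with
  | nil => simp
  | cons g S ih =>
    simp only [List.foldl_cons] at hj' ⊢
    rw [ih (bs.modify g.toNat (· ++ [v])) hnd.of_cons (fun x hx => hpos x (by simp [hx]))
        (by simpa using hj) hj']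
    have hg0 : 0 ≤ g := hpos g (by simp)
    have hmod : ∀ (hjj : j < (bs.modify g.toNat (· ++ [v])).length),
        (bs.modify g.toNat (· ++ [v]))[j]'hjj
          = if g.toNat = j then bs[j] ++ [v] else bs[j] :=
      fun hjj => List.getElem_modify _ _ _ _ (by simpa using hjj)
    by_cases hjS : (j : Int) ∈ S
    · have hne : g.toNat ≠ j := by
        intro hEq
        have : (j : Int) = g := by omega
        exact (List.nodup_cons.mp hnd).1 (this ▸ hjS)
      simp [hjS, hmod, hne, List.mem_cons]
    · have : ((j : Int) ∈ g :: S) ↔ g.toNat = j := by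
        simp only [List.mem_cons, hjS, or_false]
        omega
      simp only [hjS, if_false, hmod, this]

lemma pv_hit_elems_nonneg (name : String) : ∀ g ∈ pvHit name, 0 ≤ g := by
  intro g hg
  obtain ⟨w, hflat, _⟩ := (pv_hit_iff name g).mp hg
  have : ∀ q ∈ pvFLAT, 0 ≤ q.2 := by decide
  exact this _ hflat

-- one channel step of B, elementwise
lemma pv_step_getElem (bs : List (List Int)) (i : Int) (c : String) (j : Nat) (hj : j < bs.length) :
    ((PySem.List.sorted (pvHit (PySem.Str.lower c)) (fun x => x) false).foldl
        (fun bs gi => bs.modify gi.toNat (· ++ [i])) bs)[j]'(by rw [pv_modify_foldl_length]; exact hj)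
      = if (j : Int) ∈ pvHit (PySem.Str.lower c) then bs[j] ++ [i] else bs[j] := by
  have hperm := PySem.List.sorted_perm (pvHit (PySem.Str.lower c)) (fun x : Int => x) false
  rw [pv_modify_foldl_getElem _ _ _ (hperm.nodup_iff.mpr (pv_nodup_hit _))
      (fun g hg => pv_hit_elems_nonneg _ g (hperm.mem_iff.mp hg)) j hj]
  rw [if_congr (Iff.intro (fun h => hperm.mem_iff.mp h) (fun h => hperm.mem_iff.mpr h)) rfl rfl]

-- B's fold over the channels: length and elementwise value
lemma pv_fold_length (pairs : List (Int × String)) (bs : List (List Int)) :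
    (pairs.foldl (fun bs p =>
        (PySem.List.sorted (pvHit (PySem.Str.lower p.2)) (fun x => x) false).foldl
          (fun bs gi => bs.modify gi.toNat (· ++ [p.1])) bs) bs).length = bs.length := by
  induction pairs generalizing bs with
  | nil => rfl
  | cons p ps ih => rw [List.foldl_cons, ih, pv_modify_foldl_length]

lemma pv_fold_getElem (pairs : List (Int × String)) (bs : List (List Int)) (j : Nat)
    (hj : j < bs.length)
    (hj' : j < (pairs.foldl (fun bs p =>
        (PySem.List.sorted (pvHit (PySem.Str.lower p.2)) (fun x => x) false).foldl
          (fun bs gi => bs.modify gi.toNat (· ++ [p.1])) bs) bs).length) :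
    (pairs.foldl (fun bs p =>
        (PySem.List.sorted (pvHit (PySem.Str.lower p.2)) (fun x => x) false).foldl
          (fun bs gi => bs.modify gi.toNat (· ++ [p.1])) bs) bs)[j]'hj'
      = bs[j] ++ pairs.filterMap
          (fun p => if (j : Int) ∈ pvHit (PySem.Str.lower p.2) then some p.1 else none) := by
  induction pairs generalizing bs with
  | nil => simp
  | cons p ps ih =>
    simp only [List.foldl_cons] at hj' ⊢
    rw [ih _ (by rw [pv_modify_foldl_length]; exact hj) hj']
    rw [pv_step_getElem bs p.1 p.2 j hj]
    by_cases hc : (j : Int) ∈ pvHit (PySem.Str.lower p.2)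
    · simp [hc]
    · simp [hc]

lemma pv_enumerate_map {α β : Type} (f : α → β) (xs : List α) (s : Int) :
    PySem.List.enumerate (xs.map f) s = (PySem.List.enumerate xs s).map (fun p => (p.1, f p.2)) := by
  induction xs generalizing s with
  | nil => simp [PySem.List.enumerate_nil]
  | cons x xs ih => simp [PySem.List.enumerate_cons, ih]

-- the condition of A's j-th comprehension coincides with membership of j in B's hit set
lemma pv_cond (want : List String) (j : Int) (nm : String)
    (hflat : ∀ w : String, (w, j) ∈ pvFLAT ↔ w ∈ want) :
    (want.any (fun w => PySem.Str.isIn w nm) = true) ↔ j ∈ pvHit nm := by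
  rw [pv_hit_iff, List.any_eq_true]
  constructor
  · rintro ⟨w, hw, hin⟩
    exact ⟨w, (hflat w).mpr hw, (PySem.Str.isIn_iff_infix w nm).mp hin⟩
  · rintro ⟨w, hw, hinf⟩
    exact ⟨w, (hflat w).mp hw, (PySem.Str.isIn_iff_infix w nm).mpr hinf⟩

lemma pv_pair_mem (l : List (String × Int)) (w : String) (j : Int) :
    (w, j) ∈ l ↔ w ∈ l.filterMap (fun q => if q.2 = j then some q.1 else none) := by
  induction l with
  | nil => simp
  | cons q l ih =>
    rcases q with ⟨a, b⟩
    by_cases hb : b = j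
    · subst hb
      have h2 : List.filterMap (fun q : String × Int => if q.2 = b then some q.1 else none) ((a, b) :: l)
          = a :: List.filterMap (fun q : String × Int => if q.2 = b then some q.1 else none) l := by
        simp
      rw [h2, List.mem_cons, List.mem_cons, ← ih, Prod.mk.injEq]
      tauto
    · have h2 : List.filterMap (fun q : String × Int => if q.2 = j then some q.1 else none) ((a, b) :: l)
          = List.filterMap (fun q : String × Int => if q.2 = j then some q.1 else none) l := by
        simp [hb]
      rw [h2, List.mem_cons, ← ih, Prod.mk.injEq]
      have : ¬ (w = a ∧ j = b) := fun ⟨_, hj⟩ => hb hj.symm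
      tauto

lemma pv_if_eq {α : Type} (want : List String) (j : Int) (nm : String) (x y : α)
    (hflat : ∀ w : String, (w, j) ∈ pvFLAT ↔ w ∈ want) :
    (if want.any (fun w => PySem.Str.isIn w nm) = true then x else y)
      = (if j ∈ pvHit nm then x else y) := by
  by_cases h : j ∈ pvHit nm
  · rw [if_pos h, if_pos ((pv_cond want j nm hflat).mpr h)]
  · rw [if_neg h, if_neg (fun hc => h ((pv_cond want j nm hflat).mp hc))]

-- ===== VERDICT =====
set_option maxHeartbeats 2000000 in
theorem find_roi_indices_py_spec : Claim_equal_find_roi_indices_py := by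
  intro ch_names _
  show find_roi_indices_py ch_names = find_roi_indices_py_alt ch_names
  have hkeys : pvROI_KEYS = ["frontal","frontocent","central","parietal","occipital","temp_left","temp_right"] := by decide
  have hA : find_roi_indices_py ch_names
      = [["fp1","fp2","f1","f2","f3","f4","f5","f6","f7","f8","fz"],
         ["fc1","fc2","fc3","fc4","fc5","fc6","fcz"],
         ["c1","c2","c3","c4","c5","c6","cz"],
         ["p1","p2","p3","p4","p5","p6","pz"],
         ["o1","o2","oz"],
         ["t7","t3","ft7","tp7"],
         ["t8","t4","ft8","tp8"]].map (fun want =>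
        (PySem.List.enumerate ch_names).filterMap
          (fun p => if want.any (fun w => PySem.Str.isIn w (PySem.Str.lower p.2)) then some p.1 else none)) := by
    unfold find_roi_indices_py
    rw [hkeys]
    simp only [List.foldl_cons, List.foldl_nil, List.map_cons, List.map_nil]
    simp only [pv_enumerate_map, List.filterMap_map]
    rfl
  have hbuckets : pvROI_GROUPS.keys.map (fun _ => ([] : List Int))
      = [[],[],[],[],[],[],[]] := by decide
  have hB : find_roi_indices_py_alt ch_names
      = (PySem.List.enumerate ch_names).foldl (fun bs p =>
          (PySem.List.sorted (pvHit (PySem.Str.lower p.2)) (fun x => x) false).foldl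
            (fun bs gi => bs.modify gi.toNat (· ++ [p.1])) bs)
          ([[],[],[],[],[],[],[]] : List (List Int)) := by
    unfold find_roi_indices_py_alt
    rw [hbuckets]
    rfl
  rw [hA, hB]
  apply List.ext_getElem
  · rw [pv_fold_length]; rfl
  · intro j hj1 hj2
    have hj7 : j < 7 := by simpa using hj1
    rw [pv_fold_getElem _ _ j (by simpa using hj7)]
    interval_cases j <;>
      (simp only [List.getElem_map, List.getElem_cons_zero, List.getElem_cons_succ,
        List.nil_append]
       refine List.filterMap_congr (fun p _ => ?_)
       refine pv_if_eq _ _ _ _ _ (fun w => ?_)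
       rw [pv_pair_mem]
       norm_num [pvFLAT]
       tauto)
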